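-- pv_equiv track=rewrite | github.com/vihoacao/cp1404practicals | prac_05/wimbledon.py | count_champions
-- ===== SOURCE A (Python) =====
-- def count_champions(data):
--     champions = {}
--     for row in data:
--         name = row[2]
--         if name in champions:
--             champions[name] += 1
--         else:
--             champions[name] = 1
--     return champions
-- ===== SOURCE B (Python) =====
-- def count_champions(data):
--     names = [row[2] for row in data]
--     champions = {}
--     for name in names:
--         if name not in champions:
--             champions[name] = names.count(name)
--     return champions
-- ===== Notes on version B (the rewrite author's own statement) =====
-- stated objective: alternative
-- what changed: B first extracts the name column, then fills the dict only at each name's first occurrence with a full-list names.count(name) scan, instead of A's incremental per-row counter update; same dict (first-occurrence key order, total counts).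
import Mathlib
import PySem

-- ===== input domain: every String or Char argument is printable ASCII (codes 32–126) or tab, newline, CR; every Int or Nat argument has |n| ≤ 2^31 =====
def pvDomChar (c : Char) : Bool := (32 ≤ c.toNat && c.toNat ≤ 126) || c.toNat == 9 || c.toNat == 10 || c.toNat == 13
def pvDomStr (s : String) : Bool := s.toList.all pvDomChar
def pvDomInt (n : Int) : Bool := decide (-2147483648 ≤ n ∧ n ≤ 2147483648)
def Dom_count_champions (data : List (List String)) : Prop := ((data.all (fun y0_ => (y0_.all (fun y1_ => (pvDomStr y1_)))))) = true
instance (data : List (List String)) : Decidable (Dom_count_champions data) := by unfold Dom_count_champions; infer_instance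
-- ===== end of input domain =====

-- B replaces A's incremental per-row counter update by: extract the name column, then fill the
-- dict only at each name's first occurrence with a whole-list count of that name (alternative, not faster).

-- ===== PORT A =====
-- row[2] (IndexError excluded by Pre_; the .getD "" branch is unreachable under Pre_)
def extractName (row : List String) : String := (PySem.List.pyGet? row 2).getD ""

-- first-match lookup in the association list (Python 'name in champions' / 'champions[name]')
def lookupA : List (String × Int) → String → Option Int
  | [], _ => none
  | (k, v) :: rest, name => if k = name then some v else lookupA rest name

-- overwrite the first matching key in place (Python 'champions[name] = …' on an existing key)
def setA : List (String × Int) → String → Int → List (String × Int)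
  | [], _, _ => []
  | (k, v) :: rest, name, x => if k = name then (k, x) :: rest else (k, v) :: setA rest name x

-- A's loop body: if name in champions: champions[name] += 1 else: champions[name] = 1
def stepA (ch : List (String × Int)) (name : String) : List (String × Int) :=
  match lookupA ch name with
  | some v => setA ch name (v + 1)
  | none => ch ++ [(name, 1)]

def count_champions (data : List (List String)) : List (String × Int) :=
  data.foldl (fun ch row => stepA ch (extractName row)) []

-- ===== PORT B =====
def count_champions_alt (data : List (List String)) : List (String × Int) :=
  let names := data.map extractName
  names.foldl
    (fun ch name =>
      if (lookupA ch name).isSome then ch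
      else ch ++ [(name, (PySem.List.count names name : Int))])
    []

-- ===== PRECONDITION & SPEC =====
-- Pre_ excludes exactly the inputs where Python's row[2] raises IndexError (a row shorter than 3).
def Pre_count_champions (data : List (List String)) : Prop := ∀ row ∈ data, 3 ≤ row.length
instance (data : List (List String)) : Decidable (Pre_count_champions data) := by unfold Pre_count_champions; infer_instance
def pvWitness_count_champions : List (List String) :=
  [["1980", "F", "Bjorn Borg"], ["1981", "F", "John McEnroe"], ["1982", "F", "Bjorn Borg"]]

def Spec_count_champions (data : List (List String)) (out : List (String × Int)) : Prop := out = count_champions_alt data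
instance (data : List (List String)) (out : List (String × Int)) : Decidable (Spec_count_champions data out) := by unfold Spec_count_champions; infer_instance

-- ===== CLAIM (what is proved, stated in full; the proofs are below) =====
def Claim_equal_count_champions : Prop := ∀ (data : List (List String)), Dom_count_champions data → Pre_count_champions data → Spec_count_champions data (count_champions data)

-- ===== LEMMAS AND PROOFS =====

def keysOf (d : List (String × Int)) : List String := d.map Prod.fst

-- the keys of `ns` not in `keys`, in first-occurrence order
def newKeys (keys : List String) : List String → List String
  | [] => []
  | n :: t => if n ∈ keys then newKeys keys t else n :: newKeys (n :: keys) t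

theorem lookupA_eq_none_iff (d : List (String × Int)) (n : String) :
    lookupA d n = none ↔ n ∉ keysOf d := by
  induction d with
  | nil => simp [lookupA, keysOf]
  | cons p rest ih =>
    obtain ⟨k, v⟩ := p
    by_cases h : k = n
    · subst h
      simp [lookupA, keysOf]
    · simp only [lookupA, if_neg h, ih, keysOf, List.map_cons, List.mem_cons]
      constructor
      · rintro hm (rfl | hmem)
        · exact h rfl
        · exact hm hmem
      · intro hm hmem
        exact hm (Or.inr hmem)

theorem keysOf_setA (d : List (String × Int)) (n : String) (x : Int) :
    keysOf (setA d n x) = keysOf d := by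
  induction d with
  | nil => rfl
  | cons p rest ih =>
    obtain ⟨k, v⟩ := p
    by_cases h : k = n
    · simp [setA, keysOf, h]
    · simp only [setA, if_neg h, keysOf, List.map_cons]
      have := ih
      simp only [keysOf] at this
      rw [this]

theorem newKeys_congr (k1 k2 t : List String) (h : ∀ x, x ∈ k1 ↔ x ∈ k2) :
    newKeys k1 t = newKeys k2 t := by
  induction t generalizing k1 k2 with
  | nil => rfl
  | cons n t ih =>
    by_cases hn : n ∈ k1
    · simp [newKeys, hn, (h n).mp hn, ih k1 k2 h]
    · have hn2 : n ∉ k2 := fun c => hn ((h n).mpr c)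
      simp only [newKeys, if_neg hn, if_neg hn2]
      refine congrArg _ (ih _ _ ?_)
      intro x; simp [h x]

theorem mem_newKeys_not_mem (keys t : List String) (m : String) (hm : m ∈ newKeys keys t) :
    m ∉ keys := by
  induction t generalizing keys with
  | nil => simp [newKeys] at hm
  | cons n t ih =>
    by_cases hn : n ∈ keys
    · exact ih keys (by simpa [newKeys, hn] using hm)
    · simp only [newKeys, if_neg hn, List.mem_cons] at hm
      rcases hm with rfl | hm
      · exact hn
      · exact fun c => ih _ hm (List.mem_cons_of_mem _ c)

-- map part of the `some` case: bumping the existing key n absorbs the head occurrence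
theorem map_setA_bump (d : List (String × Int)) (n : String) (v : Int) (t : List String)
    (hnd : (keysOf d).Nodup) (hv : lookupA d n = some v) :
    (setA d n (v + 1)).map (fun p => (p.1, p.2 + (PySem.List.count t p.1 : Int)))
      = d.map (fun p => (p.1, p.2 + (PySem.List.count (n :: t) p.1 : Int))) := by
  induction d with
  | nil => simp [lookupA] at hv
  | cons p rest ih =>
    obtain ⟨k, w⟩ := p
    simp only [keysOf, List.map_cons, List.nodup_cons] at hnd
    by_cases h : k = n
    · subst h
      have hw : w = v := by simpa [lookupA] using hv
      subst hw
      have hc : (PySem.List.count (k :: t) k : Int) = (PySem.List.count t k : Int) + 1 := by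
        simp [PySem.List.count_eq, List.count_cons]
      simp only [setA]
      simp only [if_true]
      simp only [List.map_cons, hc]
      congr 1
      · rw [Prod.ext_iff]
        exact ⟨rfl, by ring⟩
      · refine List.map_congr_left ?_
        intro p hp
        have hne : p.1 ≠ k := by
          intro e; exact hnd.1 (e ▸ (List.mem_map_of_mem hp : p.1 ∈ keysOf rest))
        have : (PySem.List.count (k :: t) p.1 : Int) = (PySem.List.count t p.1 : Int) := by
          simp [PySem.List.count_eq, List.count_cons, hne, Ne.symm hne]
        rw [this]
    · have hv' : lookupA rest n = some v := by simpa [lookupA, h] using hv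
      simp only [setA, if_neg h, List.map_cons]
      congr 1
      · have hkn : k ≠ n := h
        have : (PySem.List.count (n :: t) k : Int) = (PySem.List.count t k : Int) := by
          simp [PySem.List.count_eq, List.count_cons, hkn, Ne.symm hkn]
        rw [this]
      · exact ih hnd.2 hv'

-- tail part: new keys avoid n when n is already a key
theorem map_newKeys_count (keys t : List String) (n : String) (hn : n ∈ keys) :
    (newKeys keys t).map (fun m => (m, (PySem.List.count t m : Int)))
      = (newKeys keys t).map (fun m => (m, (PySem.List.count (n :: t) m : Int))) := by
  refine List.map_congr_left ?_
  intro m hm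
  have hmn : m ≠ n := fun e => mem_newKeys_not_mem keys t m hm (e ▸ hn)
  have : (PySem.List.count (n :: t) m : Int) = (PySem.List.count t m : Int) := by
    simp [PySem.List.count_eq, List.count_cons, hmn, Ne.symm hmn]
  rw [this]

theorem foldA_merge (ns : List String) (d : List (String × Int)) (hnd : (keysOf d).Nodup) :
    ns.foldl stepA d
      = d.map (fun p => (p.1, p.2 + (PySem.List.count ns p.1 : Int)))
        ++ (newKeys (keysOf d) ns).map (fun m => (m, (PySem.List.count ns m : Int))) := by
  induction ns generalizing d with
  | nil =>
    simp [newKeys, PySem.List.count_eq]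
  | cons n t ih =>
    simp only [List.foldl_cons]
    rcases hv : lookupA d n with _ | v
    · -- new key: append (n, 1)
      have hnotin : n ∉ keysOf d := (lookupA_eq_none_iff d n).mp hv
      have hnd' : (keysOf (d ++ [(n, (1 : Int))])).Nodup := by
        simp only [keysOf, List.map_append]
        refine List.Nodup.append hnd (by simp) ?_
        intro a ha hb
        simp only [List.map_cons, List.map_nil, List.mem_singleton] at hb
        exact hnotin (hb ▸ ha)
      simp only [stepA, hv]
      rw [ih (d ++ [(n, (1 : Int))]) hnd']
      have hkeys : keysOf (d ++ [(n, (1 : Int))]) = keysOf d ++ [n] := by simp [keysOf]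
      rw [hkeys]
      rw [newKeys_congr (keysOf d ++ [n]) (n :: keysOf d) t (by intro x; simp; tauto)]
      have hrhs : newKeys (keysOf d) (n :: t) = n :: newKeys (n :: keysOf d) t := by
        simp [newKeys, hnotin]
      rw [hrhs]
      simp only [List.map_append, List.map_cons, List.map_nil]
      rw [List.append_assoc]
      congr 1
      · refine List.map_congr_left ?_
        intro p hp
        have hne : p.1 ≠ n := fun e => hnotin (e ▸ (List.mem_map_of_mem hp : p.1 ∈ keysOf d))
        have : (PySem.List.count (n :: t) p.1 : Int) = (PySem.List.count t p.1 : Int) := by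
          simp [PySem.List.count_eq, List.count_cons, hne, Ne.symm hne]
        rw [this]
      · simp only [List.singleton_append]
        congr 1
        · have hc : (PySem.List.count (n :: t) n : Int) = (PySem.List.count t n : Int) + 1 := by
            simp [PySem.List.count_eq, List.count_cons]
          rw [hc, Prod.ext_iff]
          constructor
          · rfl
          · ring
        · refine List.map_congr_left ?_
          intro m hm
          have hmn : m ≠ n := fun e =>
            mem_newKeys_not_mem _ t m hm (e ▸ List.mem_cons_self ..)
          have : (PySem.List.count (n :: t) m : Int) = (PySem.List.count t m : Int) := by
            simp [PySem.List.count_eq, List.count_cons, hmn, Ne.symm hmn]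
          rw [this]
    · -- existing key: bump in place
      have hnd' : (keysOf (setA d n (v + 1))).Nodup := by rw [keysOf_setA]; exact hnd
      have hmem : n ∈ keysOf d := by
        by_contra hc
        rw [← lookupA_eq_none_iff] at hc
        rw [hv] at hc; cases hc
      simp only [stepA, hv]
      rw [ih (setA d n (v + 1)) hnd', keysOf_setA]
      rw [map_setA_bump d n v t hnd hv]
      have hsk : newKeys (keysOf d) (n :: t) = newKeys (keysOf d) t := by
        simp [newKeys, hmem]
      rw [hsk, map_newKeys_count (keysOf d) t n hmem]

theorem foldB_merge (full ns : List String) (out : List (String × Int)) :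
    ns.foldl
        (fun ch name =>
          if (lookupA ch name).isSome then ch
          else ch ++ [(name, (PySem.List.count full name : Int))]) out
      = out ++ (newKeys (keysOf out) ns).map (fun m => (m, (PySem.List.count full m : Int))) := by
  induction ns generalizing out with
  | nil => simp [newKeys]
  | cons n t ih =>
    simp only [List.foldl_cons]
    by_cases h : (lookupA out n).isSome
    · have hmem : n ∈ keysOf out := by
        by_contra hc
        rw [← lookupA_eq_none_iff] at hc
        simp [hc] at h
      rw [if_pos h, ih out]
      simp [newKeys, hmem]
    · have hnotin : n ∉ keysOf out := by
        rcases hl : lookupA out n with _ | v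
        · exact (lookupA_eq_none_iff out n).mp hl
        · simp [hl] at h
      rw [if_neg h, ih]
      have hkeys : keysOf (out ++ [(n, (PySem.List.count full n : Int))]) = keysOf out ++ [n] := by
        simp [keysOf]
      rw [hkeys, newKeys_congr (keysOf out ++ [n]) (n :: keysOf out) t (by intro x; simp; tauto)]
      simp [newKeys, hnotin]

-- ===== VERDICT (by name: the statement is the Claim_ definition above) =====
theorem count_champions_spec : Claim_equal_count_champions := by
  intro data _ _
  show count_champions data = count_champions_alt data
  have hA : count_champions data = (data.map extractName).foldl stepA [] := by
    unfold count_champions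
    rw [List.foldl_map]
  have hB : count_champions_alt data
      = (data.map extractName).foldl
          (fun ch name =>
            if (lookupA ch name).isSome then ch
            else ch ++ [(name, (PySem.List.count (data.map extractName) name : Int))]) [] := rfl
  rw [hA, hB, foldA_merge _ [] (by simp [keysOf]), foldB_merge]
  simp [keysOf]
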